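-- pv_equiv track=rewrite | github.com/MIRIDIH-2023/UDOP-ket5 | core/datasets/rvlcdip.py | group_tokens
-- ===== SOURCE A (Python) =====
-- def group_tokens(mask):
--
--     group_lst = []
--     i=0
--     prev=0
--
--     for m in mask:
--         if m == 0:
--             if i == prev:
--                 pass
--             else:
--                 group_lst.append([prev, i])
--             prev = i+1
--         i += 1
--
--     if prev != i:
--         group_lst.append([prev, i])
--
--     return group_lst
-- ===== SOURCE B (Python) =====
-- def group_tokens(mask):
--     res = []
--     n = len(mask)
--     i = 0
--     while i < n:
--         if mask[i] == 0:
--             i += 1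
--         else:
--             j = i + 1
--             while j < n and mask[j] != 0:
--                 j += 1
--             res.append([i, j])
--             i = j
--     return res
-- ===== Notes on version B (the rewrite author's own statement) =====
-- stated objective: alternative
-- what changed: Replaces A's per-element fold with prev/i delimiter bookkeeping and a post-loop flush by a two-pointer run scanner: an outer loop skips zeros and an inner loop advances to the end of each non-zero run, emitting [start, end) directly with no trailing fix-up.
import Mathlib
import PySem

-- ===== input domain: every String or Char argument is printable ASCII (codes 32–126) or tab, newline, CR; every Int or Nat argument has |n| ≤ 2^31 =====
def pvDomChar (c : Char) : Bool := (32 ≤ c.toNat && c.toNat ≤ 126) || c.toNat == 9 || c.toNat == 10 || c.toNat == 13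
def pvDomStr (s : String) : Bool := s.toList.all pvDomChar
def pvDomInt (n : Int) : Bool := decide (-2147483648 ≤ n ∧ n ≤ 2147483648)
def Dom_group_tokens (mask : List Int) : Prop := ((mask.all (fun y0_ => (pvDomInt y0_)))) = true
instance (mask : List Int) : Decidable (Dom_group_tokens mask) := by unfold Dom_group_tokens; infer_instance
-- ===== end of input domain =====

-- B is an alternative of the same cost: a two-pointer run scanner instead of A's
-- per-element fold with prev/i bookkeeping and a post-loop flush. Return value only.

-- ===== PORT A =====
-- the for-loop over mask carrying state (group_lst, i, prev), transliterated as structural recursion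
def group_tokens_go : List Int → List (List Int) → Int → Int → (List (List Int) × Int × Int)
  | [], g, i, prev => (g, i, prev)
  | m :: rest, g, i, prev =>
    if m = 0 then
      group_tokens_go rest (if i = prev then g else g ++ [[prev, i]]) (i + 1) (i + 1)
    else
      group_tokens_go rest g (i + 1) prev

def group_tokens (mask : List Int) : List (List Int) :=
  let s := group_tokens_go mask [] 0 0
  if s.2.2 ≠ s.2.1 then s.1 ++ [[s.2.2, s.2.1]] else s.1

-- ===== PORT B =====
-- outer loop: skip zeros; on a non-zero element the inner while advances j past the run
-- (= the count of leading non-zeros of the remaining list), emitting [i, j)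
def group_tokens_alt_go : List Int → Int → List (List Int)
  | [], _ => []
  | m :: rest, i =>
    if m = 0 then group_tokens_alt_go rest (i + 1)
    else
      let t := (rest.takeWhile (fun x => !(x == 0))).length
      let j := i + 1 + (t : Int)
      [i, j] :: group_tokens_alt_go (rest.drop t) j
termination_by l _ => l.length
decreasing_by
  · simp
  · simp only [List.length_cons, List.length_drop]
    omega

def group_tokens_alt (mask : List Int) : List (List Int) :=
  group_tokens_alt_go mask 0

-- ===== PRECONDITION & SPEC =====
def Spec_group_tokens (mask : List Int) (out : List (List Int)) : Prop := out = group_tokens_alt mask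
instance (mask : List Int) (out : List (List Int)) : Decidable (Spec_group_tokens mask out) := by unfold Spec_group_tokens; infer_instance

-- ===== CLAIM (what is proved, stated in full; the proofs are below) =====
def Claim_equal_group_tokens : Prop := ∀ (mask : List Int), Dom_group_tokens mask → Spec_group_tokens mask (group_tokens mask)

-- ===== LEMMAS AND PROOFS =====

-- finalize A's loop state exactly as A's post-loop code does
def pvFinish (s : List (List Int) × Int × Int) : List (List Int) :=
  if s.2.2 ≠ s.2.1 then s.1 ++ [[s.2.2, s.2.1]] else s.1

-- joint invariant of A's loop: with no open run (prev = i) the rest of A's computation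
-- produces B's run list from index i; with an open run (prev < i) it first closes [prev, ·).
theorem pv_main (mask : List Int) :
    (∀ (g : List (List Int)) (i : Int),
        pvFinish (group_tokens_go mask g i i) = g ++ group_tokens_alt_go mask i) ∧
    (∀ (g : List (List Int)) (i prev : Int), prev < i →
        pvFinish (group_tokens_go mask g i prev)
          = g ++ [prev, i + ((mask.takeWhile (fun x => !(x == 0))).length : Int)] ::
              group_tokens_alt_go (mask.drop (mask.takeWhile (fun x => !(x == 0))).length)
                (i + ((mask.takeWhile (fun x => !(x == 0))).length : Int))) := by
  induction mask with
  | nil =>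
    constructor
    · intro g i
      simp [group_tokens_go, group_tokens_alt_go, pvFinish]
    · intro g i prev h
      simp [group_tokens_go, group_tokens_alt_go, pvFinish, h.ne]
  | cons m rest ih =>
    obtain ⟨ihc, iho⟩ := ih
    constructor
    · intro g i
      by_cases hm : m = 0
      · rw [show group_tokens_go (m :: rest) g i i
              = group_tokens_go rest g (i + 1) (i + 1) from by
            simp [group_tokens_go, hm]]
        rw [ihc g (i + 1)]
        simp [group_tokens_alt_go, hm]
      · rw [show group_tokens_go (m :: rest) g i i
              = group_tokens_go rest g (i + 1) i from by
            simp [group_tokens_go, hm]]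
        rw [iho g (i + 1) i (by omega)]
        have hbm : (!(m == 0)) = true := by simp [hm]
        simp [group_tokens_alt_go, hm, hbm]
    · intro g i prev h
      by_cases hm : m = 0
      · have hip : ¬ i = prev := by omega
        rw [show group_tokens_go (m :: rest) g i prev
              = group_tokens_go rest (g ++ [[prev, i]]) (i + 1) (i + 1) from by
            simp [group_tokens_go, hm, hip]]
        rw [ihc (g ++ [[prev, i]]) (i + 1)]
        have hbm : (!(m == 0)) = false := by simp [hm]
        simp [List.takeWhile_cons, hbm, group_tokens_alt_go, hm]
      · rw [show group_tokens_go (m :: rest) g i prev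
              = group_tokens_go rest g (i + 1) prev from by
            simp [group_tokens_go, hm]]
        rw [iho g (i + 1) prev (by omega)]
        have hbm : (!(m == 0)) = true := by simp [hm]
        simp [List.takeWhile_cons, hbm]
        push_cast
        ring_nf
        exact ⟨trivial, trivial⟩

-- ===== VERDICT (by name: the statement is the Claim_ definition above) =====
theorem group_tokens_spec : Claim_equal_group_tokens := by
  intro mask _
  show group_tokens mask = group_tokens_alt mask
  have h := (pv_main mask).1 [] 0
  simpa [group_tokens, pvFinish, group_tokens_alt] using h
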